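-- pv_equiv track=rewrite | github.com/L-Zhe/CoRPG | utils/penalty.py | word_n_gram
-- ===== SOURCE A (Python) =====
-- def word_n_gram(sent, n):
--     gram = []
--     for line in sent:
--         _gram = []
--         for i in range(len(line)):
--             token = []
--             for j in range(i - n + 1, i + 1):
--                 st = j
--                 ed = j + n
--                 if st >= 0 and ed <= len(line):
--                     token.append(' '.join(line[st:ed]))
--             _gram.append(token)
--         gram.append(_gram)
--     return gram
-- ===== SOURCE B (Python) =====
-- def word_n_gram(sent, n):
--     result = []
--     for line in sent:
--         L = len(line)
--         if n <= 0:
--             result.append([[] for _ in line])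
--             continue
--         # each distinct n-gram string is built exactly once
--         grams = [' '.join(line[j:j + n]) for j in range(L - n + 1)]
--         result.append([grams[max(0, i - n + 1):min(i, L - n) + 1] for i in range(L)])
--     return result
-- ===== Notes on version B (the rewrite author's own statement) =====
-- stated objective: faster
-- what changed: B joins each distinct n-gram string once per line and then slices that precomputed list per position, instead of re-joining up to n n-grams at every position.
import Mathlib
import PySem

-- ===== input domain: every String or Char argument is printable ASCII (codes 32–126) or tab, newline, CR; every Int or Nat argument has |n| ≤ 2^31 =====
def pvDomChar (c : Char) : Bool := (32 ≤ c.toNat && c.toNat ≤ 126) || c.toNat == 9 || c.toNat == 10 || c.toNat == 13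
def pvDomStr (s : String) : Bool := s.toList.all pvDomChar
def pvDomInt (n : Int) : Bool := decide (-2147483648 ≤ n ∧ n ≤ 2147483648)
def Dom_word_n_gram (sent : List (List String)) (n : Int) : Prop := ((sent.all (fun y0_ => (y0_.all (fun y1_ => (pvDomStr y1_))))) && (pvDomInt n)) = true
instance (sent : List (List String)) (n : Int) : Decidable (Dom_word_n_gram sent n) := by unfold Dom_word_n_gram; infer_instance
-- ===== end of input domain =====

-- B builds each distinct n-gram string once per line and slices that list per position,
-- instead of A's re-joining up to n n-grams at every position (asymptotically less joining work).

-- ===== PORT A =====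
def word_n_gram (sent : List (List String)) (n : Int) : List (List (List String)) :=
  sent.foldl (fun gram line =>
    gram ++ [(PySem.List.pyRange 0 (line.length : Int) 1).foldl (fun g i =>
      g ++ [(PySem.List.pyRange (i - n + 1) (i + 1) 1).foldl (fun token j =>
        let st := j
        let ed := j + n
        if (decide (st ≥ 0) && decide (ed ≤ (line.length : Int))) then
          token ++ [PySem.Str.join " " (PySem.List.slice line (some st) (some ed))]
        else token) []]) []]) []

-- ===== PORT B =====
def wngAltLine (line : List String) (n : Int) : List (List String) :=
  if n ≤ 0 then line.map (fun _ => [])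
  else
    let L : Int := (line.length : Int)
    let grams := (PySem.List.pyRange 0 (L - n + 1) 1).map
      (fun j => PySem.Str.join " " (PySem.List.slice line (some j) (some (j + n))))
    (PySem.List.pyRange 0 L 1).map
      (fun i => PySem.List.slice grams (some (max 0 (i - n + 1))) (some (min i (L - n) + 1)))

def word_n_gram_alt (sent : List (List String)) (n : Int) : List (List (List String)) :=
  sent.map (fun line => wngAltLine line n)

-- ===== PRECONDITION & SPEC =====
def Spec_word_n_gram (sent : List (List String)) (n : Int) (out : List (List (List String))) : Prop := out = word_n_gram_alt sent n
instance (sent : List (List String)) (n : Int) (out : List (List (List String))) : Decidable (Spec_word_n_gram sent n out) := by unfold Spec_word_n_gram; infer_instance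

-- ===== CLAIM (what is proved, stated in full; the proofs are below) =====
def Claim_equal_word_n_gram : Prop := ∀ (sent : List (List String)) (n : Int), Dom_word_n_gram sent n → Spec_word_n_gram sent n (word_n_gram sent n)

-- ===== LEMMAS AND PROOFS =====

-- the A-side inner loop as filter+map over the index range
theorem wng_token_eq (line : List String) (n i : Int) :
    (PySem.List.pyRange (i - n + 1) (i + 1) 1).foldl (fun token j =>
        let st := j
        let ed := j + n
        if (decide (st ≥ 0) && decide (ed ≤ (line.length : Int))) then
          token ++ [PySem.Str.join " " (PySem.List.slice line (some st) (some ed))]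
        else token) []
    = ((PySem.List.pyRange (i - n + 1) (i + 1) 1).filter
        (fun j => decide (j ≥ 0) && decide (j + n ≤ (line.length : Int)))).map
        (fun j => PySem.Str.join " " (PySem.List.slice line (some j) (some (j + n)))) := by
  simpa using PySem.List.foldl_append_if
    (fun j => decide (j ≥ 0) && decide (j + n ≤ (line.length : Int)))
    (fun j => PySem.Str.join " " (PySem.List.slice line (some j) (some (j + n))))
    (PySem.List.pyRange (i - n + 1) (i + 1) 1) []

-- the filtered index range is a contiguous sub-range
theorem wng_filter_range (L n i : Int) (hn : 0 < n) (hi0 : 0 ≤ i) (hiL : i < L) :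
    (PySem.List.pyRange (i - n + 1) (i + 1) 1).filter
        (fun j => decide (j ≥ 0) && decide (j + n ≤ L))
    = PySem.List.pyRange (max 0 (i - n + 1)) (min (i + 1) (L - n + 1)) 1 := by
  set lo := max 0 (i - n + 1) with hlo
  set hi := min (i + 1) (L - n + 1) with hhi
  by_cases hLn : n ≤ L
  · have h1 : i - n + 1 ≤ lo := by omega
    have h2 : lo ≤ hi := by omega
    have h3 : hi ≤ i + 1 := by omega
    rw [PySem.List.pyRange_one_append (i - n + 1) lo (i + 1) h1 (by omega),
        PySem.List.pyRange_one_append lo hi (i + 1) h2 h3, List.filter_append, List.filter_append]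
    have e1 : (PySem.List.pyRange (i - n + 1) lo 1).filter
        (fun j => decide (j ≥ 0) && decide (j + n ≤ L)) = [] := by
      rw [List.filter_eq_nil_iff]
      intro j hj
      rw [PySem.List.mem_pyRange_one] at hj
      simp only [Bool.and_eq_true, decide_eq_true_eq, not_and, ge_iff_le]
      omega
    have e2 : (PySem.List.pyRange lo hi 1).filter
        (fun j => decide (j ≥ 0) && decide (j + n ≤ L)) = PySem.List.pyRange lo hi 1 := by
      rw [List.filter_eq_self]
      intro j hj
      rw [PySem.List.mem_pyRange_one] at hj
      simp only [Bool.and_eq_true, decide_eq_true_eq, ge_iff_le]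
      omega
    have e3 : (PySem.List.pyRange hi (i + 1) 1).filter
        (fun j => decide (j ≥ 0) && decide (j + n ≤ L)) = [] := by
      rw [List.filter_eq_nil_iff]
      intro j hj
      rw [PySem.List.mem_pyRange_one] at hj
      simp only [Bool.and_eq_true, decide_eq_true_eq, not_and, ge_iff_le]
      omega
    rw [e1, e2, e3]
    simp
  · -- n > L: no window fits, both sides are empty
    have e1 : (PySem.List.pyRange (i - n + 1) (i + 1) 1).filter
        (fun j => decide (j ≥ 0) && decide (j + n ≤ L)) = [] := by
      rw [List.filter_eq_nil_iff]
      intro j hj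
      simp only [Bool.and_eq_true, decide_eq_true_eq, not_and, ge_iff_le]
      omega
    rw [e1, PySem.List.pyRange_one_eq_nil (by omega)]

-- slicing the precomputed gram list gives the mapped sub-range
theorem wng_slice_grams (line : List String) (n i : Int) (hn : 0 < n) (hLn : n ≤ (line.length : Int))
    (hi0 : 0 ≤ i) (hiL : i < (line.length : Int)) :
    PySem.List.slice ((PySem.List.pyRange 0 ((line.length : Int) - n + 1) 1).map
        (fun j => PySem.Str.join " " (PySem.List.slice line (some j) (some (j + n)))))
      (some (max 0 (i - n + 1))) (some (min i ((line.length : Int) - n) + 1))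
    = (PySem.List.pyRange (max 0 (i - n + 1)) (min (i + 1) ((line.length : Int) - n + 1)) 1).map
        (fun j => PySem.Str.join " " (PySem.List.slice line (some j) (some (j + n)))) := by
  set L := (line.length : Int)
  set f := fun j => PySem.Str.join " " (PySem.List.slice line (some j) (some (j + n))) with hf
  set lo := max 0 (i - n + 1) with hlo
  set hi := min (i + 1) (L - n + 1) with hhi
  have hmin : min i (L - n) + 1 = hi := by omega
  rw [hmin, PySem.List.slice_toNat _ (by omega) (by omega : (0:Int) ≤ hi)]
  have hsplit : PySem.List.pyRange 0 (L - n + 1) 1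
      = PySem.List.pyRange 0 lo 1 ++ (PySem.List.pyRange lo hi 1 ++ PySem.List.pyRange hi (L - n + 1) 1) := by
    rw [PySem.List.pyRange_one_append 0 lo (L - n + 1) (by omega) (by omega),
        PySem.List.pyRange_one_append lo hi (L - n + 1) (by omega) (by omega)]
  rw [hsplit]
  have hlen1 : ((PySem.List.pyRange 0 lo 1).map f).length = lo.toNat := by
    simp [PySem.List.length_pyRange_one]
  have hlen2 : ((PySem.List.pyRange lo hi 1).map f).length = hi.toNat - lo.toNat := by
    simp [PySem.List.length_pyRange_one]; omega
  rw [List.map_append, List.map_append, ← hlen1, List.drop_left, List.take_left' ?_]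
  omega

-- per-line equality of the two inner computations
theorem wng_line_eq (line : List String) (n : Int) :
    (PySem.List.pyRange 0 (line.length : Int) 1).foldl (fun g i =>
      g ++ [(PySem.List.pyRange (i - n + 1) (i + 1) 1).foldl (fun token j =>
        let st := j
        let ed := j + n
        if (decide (st ≥ 0) && decide (ed ≤ (line.length : Int))) then
          token ++ [PySem.Str.join " " (PySem.List.slice line (some st) (some ed))]
        else token) []]) []
    = wngAltLine line n := by
  rw [PySem.List.foldl_append_singleton_eq_map, List.nil_append]
  unfold wngAltLine
  by_cases hn : n ≤ 0
  · rw [if_pos hn]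
    have : ∀ i, PySem.List.pyRange (i - n + 1) (i + 1) 1 = ([] : List Int) :=
      fun i => PySem.List.pyRange_one_eq_nil (by omega)
    calc (PySem.List.pyRange 0 (line.length : Int) 1).map _
        = (PySem.List.pyRange 0 (line.length : Int) 1).map (fun _ => ([] : List String)) := by
          apply List.map_congr_left
          intro i _
          rw [this i]
          rfl
      _ = line.map (fun _ => []) := by
          simp [List.map_const', PySem.List.length_pyRange_one]
  · rw [if_neg hn]
    apply List.map_congr_left
    intro i hi
    rw [PySem.List.mem_pyRange_one] at hi
    rw [wng_token_eq, wng_filter_range (line.length : Int) n i (by omega) hi.1 hi.2]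
    by_cases hLn : n ≤ (line.length : Int)
    · rw [wng_slice_grams line n i (by omega) hLn hi.1 hi.2]
    · -- n longer than the line: grams is empty and so is the index range
      have hg : PySem.List.pyRange 0 ((line.length : Int) - n + 1) 1 = [] :=
        PySem.List.pyRange_one_eq_nil (by omega)
      have hr : PySem.List.pyRange (max 0 (i - n + 1)) (min (i + 1) ((line.length : Int) - n + 1)) 1 = [] :=
        PySem.List.pyRange_one_eq_nil (by omega)
      rw [hg, hr]
      simp [PySem.List.slice]

-- ===== VERDICT (by name: the statement is the Claim_ definition above) =====
theorem word_n_gram_spec : Claim_equal_word_n_gram := by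
  intro sent n _
  unfold Spec_word_n_gram word_n_gram word_n_gram_alt
  rw [PySem.List.foldl_append_singleton_eq_map
    (fun line => (PySem.List.pyRange 0 (line.length : Int) 1).foldl (fun g i =>
      g ++ [(PySem.List.pyRange (i - n + 1) (i + 1) 1).foldl (fun token j =>
        let st := j
        let ed := j + n
        if (decide (st ≥ 0) && decide (ed ≤ (line.length : Int))) then
          token ++ [PySem.Str.join " " (PySem.List.slice line (some st) (some ed))]
        else token) []]) []) sent []]
  rw [List.nil_append]
  exact List.map_congr_left (fun line _ => wng_line_eq line n)
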